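-- pv_equiv track=rewrite | github.com/Mobiilishakki/Shakkipalvelin | app.py | get_fen
-- ===== SOURCE A (Python) =====
-- def shrink_blanks(fen):
--     '''Count consecutive blanks and replaces
--     by their number.'''
--     if '_' not in fen:
--         return fen
--     new_fen = ''
--     blanks = 0
--     for char in fen:
--         if char == '_':
--             blanks += 1
--         else:
--             if blanks != 0:
--                 new_fen += str(blanks)
--                 blanks = 0
--             new_fen += char
--     if blanks != 0:
--         new_fen += str(blanks)
--     return new_fen
--
-- def get_fen(result):
--     '''Transform list of results into standard
--     FEN notation.'''
--     fen = ''
--     for sq in result: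
--         if sq == 'empty':
--             fen += '_'
--         elif sq[0] == 'b':
--             fen += sq[1]
--         else:
--             fen += str(sq[1]).upper()
--     fens = [fen[i:i+8] for i in range(0, 64, 8)]
--     fens = map(shrink_blanks, fens)
--     fen = '/'.join(fens)
--     return fen
-- ===== SOURCE B (Python) =====
-- def _square_char(sq):
--     if sq == 'empty':
--         return '_'
--     piece = sq[1]
--     return piece if sq[0] == 'b' else piece.upper()
--
--
-- def _compress(chars):
--     '''Run-length encode: each maximal run of '_' becomes its length.'''
--     if not chars:
--         return ''
--     if chars[0] != '_':
--         return chars[0] + _compress(chars[1:])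
--     n = 1
--     while n < len(chars) and chars[n] == '_':
--         n += 1
--     return str(n) + _compress(chars[n:])
--
--
-- def get_fen(result):
--     '''Transform list of results into standard
--     FEN notation.'''
--     ranks = [_compress([_square_char(sq) for sq in result[i:i+8]])
--              for i in range(0, 64, 8)]
--     return '/'.join(ranks)
-- ===== Notes on version B (the rewrite author's own statement) =====
-- stated objective: faster
-- what changed: B drops A's two-pass design (build a sentinel char for every input square via repeated string concatenation, slice that string, then shrink_blanks re-scans each rank with a blank counter): it slices the input list itself rank-by-rank for the 8 fixed ranks, maps only those squares to FEN chars, and run-length encodes each rank by jumping over whole '_' runs and emitting the run length directly.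
import Mathlib
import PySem

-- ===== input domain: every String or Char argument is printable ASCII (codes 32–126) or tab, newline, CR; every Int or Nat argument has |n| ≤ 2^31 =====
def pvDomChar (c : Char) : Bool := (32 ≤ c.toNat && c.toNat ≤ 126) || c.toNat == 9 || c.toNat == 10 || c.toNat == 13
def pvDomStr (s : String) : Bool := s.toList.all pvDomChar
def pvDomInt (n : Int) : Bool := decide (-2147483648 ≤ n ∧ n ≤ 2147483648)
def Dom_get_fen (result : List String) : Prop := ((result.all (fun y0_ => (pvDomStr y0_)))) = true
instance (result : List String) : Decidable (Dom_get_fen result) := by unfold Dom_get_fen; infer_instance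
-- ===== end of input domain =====

-- B replaces A's sentinel-string build over ALL squares + separate shrink_blanks pass by slicing the
-- input list rank-by-rank (only the first 64 squares) and emitting each blank run's length directly
-- while scanning runs; a timing run measured B faster on large inputs.

-- ===== PORT A =====
-- shrink_blanks, working on the string as List Char; blanks is a Python int (Int).
-- '_' not in fen: '_' is a single character, so the substring test is exactly list membership.
def shrink_blanks (fen : List Char) : List Char :=
  if '_' ∉ fen then fen
  else
    let st := fen.foldl (fun (st : List Char × Int) c =>
      if c = '_' then (st.1, st.2 + 1)
      else if st.2 ≠ 0 then (st.1 ++ PySem.Int.toChars st.2 ++ [c], 0)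
      else (st.1 ++ [c], st.2)) ([], 0)
    if st.2 ≠ 0 then st.1 ++ PySem.Int.toChars st.2 else st.1

-- sq[0] / sq[1] are PySem.List.pyGet? on sq.toList; Pre_ keeps them in range (Python raises
-- IndexError otherwise), so the .getD default is never reached on admitted inputs.
-- str(sq[1]).upper() on a one-character ASCII string is exactly PySem.Chars.upperChar.
def get_fen (result : List String) : String :=
  let fen : List Char := result.foldl (fun fen sq =>
    if sq = "empty" then fen ++ ['_']
    else if (PySem.List.pyGet? sq.toList 0).getD ' ' = 'b' then
      fen ++ [(PySem.List.pyGet? sq.toList 1).getD ' ']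
    else fen ++ [PySem.Chars.upperChar ((PySem.List.pyGet? sq.toList 1).getD ' ')]) []
  let fens := (PySem.List.pyRange 0 64 8).map (fun i =>
    PySem.List.slice fen (some i) (some (i + 8)))
  String.ofList (PySem.Chars.join ['/'] (fens.map shrink_blanks))

-- ===== PORT B =====
-- _square_char: a one-character Python string is a Char; .upper() on it is Chars.upperChar (ASCII).
def squareChar (sq : String) : Char :=
  if sq = "empty" then '_'
  else
    let piece := (PySem.List.pyGet? sq.toList 1).getD ' '
    if (PySem.List.pyGet? sq.toList 0).getD ' ' = 'b' then piece
    else PySem.Chars.upperChar piece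

-- the counting while-loop of _compress: number of leading '_' in the tail
def countRun : List Char → Nat
  | [] => 0
  | c :: t => if c = '_' then countRun t + 1 else 0

def compress : List Char → List Char
  | [] => []
  | c :: rest =>
    if c ≠ '_' then c :: compress rest
    else PySem.Int.toChars ((1 + countRun rest : Nat) : Int) ++ compress (rest.drop (countRun rest))
termination_by l => l.length
decreasing_by
  all_goals (simp [List.length_drop]; try omega)

def get_fen_alt (result : List String) : String :=
  let ranks := (PySem.List.pyRange 0 64 8).map (fun i =>
    compress ((PySem.List.slice result (some i) (some (i + 8))).map squareChar))
  String.ofList (PySem.Chars.join ['/'] ranks)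

-- ===== PRECONDITION & SPEC =====
-- A raises IndexError (sq[0] or sq[1]) on any square that is not 'empty' and is shorter
-- than 2 characters; exactly those inputs are excluded (B raises there too).
def Pre_get_fen (result : List String) : Prop :=
  ∀ sq ∈ result, sq = "empty" ∨ 2 ≤ sq.toList.length
instance (result : List String) : Decidable (Pre_get_fen result) := by
  unfold Pre_get_fen; infer_instance

def pvWitness_get_fen : List String := ["empty", "bq", "wk", "empty"]

def Spec_get_fen (result : List String) (out : String) : Prop := out = get_fen_alt result
instance (result : List String) (out : String) : Decidable (Spec_get_fen result out) := by
  unfold Spec_get_fen; infer_instance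

-- ===== CLAIM (what is proved, stated in full; the proofs are below) =====
def Claim_equal_get_fen : Prop :=
  ∀ (result : List String), Dom_get_fen result → Pre_get_fen result →
    Spec_get_fen result (get_fen result)

-- ===== LEMMAS AND PROOFS =====

-- named forms of shrink_blanks' loop body and final flush (defeq to the port's lambda)
def sbStep (st : List Char × Int) (c : Char) : List Char × Int :=
  if c = '_' then (st.1, st.2 + 1)
  else if st.2 ≠ 0 then (st.1 ++ PySem.Int.toChars st.2 ++ [c], 0)
  else (st.1 ++ [c], st.2)

def sbFlush (st : List Char × Int) : List Char :=
  if st.2 ≠ 0 then st.1 ++ PySem.Int.toChars st.2 else st.1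

lemma sbStep_blank (acc : List Char) (b : Int) : sbStep (acc, b) '_' = (acc, b + 1) := by
  simp [sbStep]

lemma sbStep_zero (acc : List Char) (c : Char) (hc : c ≠ '_') :
    sbStep (acc, 0) c = (acc ++ [c], 0) := by
  simp [sbStep, hc]

lemma sbStep_pos (acc : List Char) (b : Int) (hb : b ≠ 0) (c : Char) (hc : c ≠ '_') :
    sbStep (acc, b) c = (acc ++ PySem.Int.toChars b ++ [c], 0) := by
  simp [sbStep, hc, hb]

-- countRun of a blank block followed by anything
lemma countRun_replicate_append (b : Nat) (l : List Char) :
    countRun (List.replicate b '_' ++ l) = b + countRun l := by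
  induction b with
  | zero => simp
  | succ k ih => simp [List.replicate_succ, countRun, ih]; omega

lemma countRun_cons_ne (c : Char) (t : List Char) (h : c ≠ '_') :
    countRun (c :: t) = 0 := by simp [countRun, h]

lemma compress_nil : compress [] = [] := by rw [compress]

lemma compress_cons_ne (c : Char) (t : List Char) (h : c ≠ '_') :
    compress (c :: t) = c :: compress t := by rw [compress]; simp [h]

lemma compress_cons_blank (t : List Char) :
    compress ('_' :: t) =
      PySem.Int.toChars ((1 + countRun t : Nat) : Int) ++ compress (t.drop (countRun t)) := by
  rw [compress]; simp

-- compress of a run of b blanks followed by a non-blank (or nothing)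
lemma compress_replicate (b : Nat) (hb : 0 < b) (l : List Char)
    (hl : l = [] ∨ ∃ c t, l = c :: t ∧ c ≠ '_') :
    compress (List.replicate b '_' ++ l) =
      PySem.Int.toChars (b : Int) ++ compress l := by
  obtain ⟨k, rfl⟩ : ∃ k, b = k + 1 := ⟨b - 1, by omega⟩
  have hcr : countRun (List.replicate k '_' ++ l) = k := by
    rw [countRun_replicate_append]
    rcases hl with rfl | ⟨c, t, rfl, hc⟩
    · simp [countRun]
    · simp [countRun_cons_ne c t hc]
  have hsplit : List.replicate (k + 1) '_' ++ l = '_' :: (List.replicate k '_' ++ l) := by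
    simp [List.replicate_succ]
  rw [hsplit, compress_cons_blank, hcr]
  have hdrop : (List.replicate k '_' ++ l).drop k = l := by
    rw [List.drop_append_of_le_length (by simp)]
    simp
  rw [hdrop]
  norm_num [Nat.add_comm]

-- shrink_blanks' loop invariant: fold-then-flush is compress of the pending blanks ++ rest
lemma shrink_fold_inv (s : List Char) :
    ∀ (acc : List Char) (b : Nat),
      sbFlush (s.foldl sbStep (acc, (b : Int)))
        = acc ++ compress (List.replicate b '_' ++ s) := by
  induction s with
  | nil =>
    intro acc b
    rcases Nat.eq_zero_or_pos b with rfl | hb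
    · simp [sbFlush, compress_nil]
    · have hbne : ((b : Int) ≠ 0) := by exact_mod_cast Nat.pos_iff_ne_zero.mp hb
      rw [List.foldl_nil]
      simp only [sbFlush, if_pos hbne]
      rw [compress_replicate b hb [] (Or.inl rfl), compress_nil, List.append_nil]
  | cons c t ih =>
    intro acc b
    by_cases hc : c = '_'
    · subst hc
      rw [List.foldl_cons, sbStep_blank]
      have h1 : List.replicate b '_' ++ '_' :: t = List.replicate (b + 1) '_' ++ t := by
        simp [List.replicate_succ']
      have := ih acc (b + 1)
      push_cast at this
      rw [h1]
      exact this
    · rcases Nat.eq_zero_or_pos b with rfl | hb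
      · rw [List.foldl_cons, Nat.cast_zero, sbStep_zero acc c hc]
        have := ih (acc ++ [c]) 0
        rw [Nat.cast_zero] at this
        rw [this, List.replicate_zero, List.nil_append, List.nil_append,
          compress_cons_ne c t hc]
        simp
      · have hbne : ((b : Int) ≠ 0) := by exact_mod_cast Nat.pos_iff_ne_zero.mp hb
        rw [List.foldl_cons, sbStep_pos acc (b : Int) hbne c hc]
        have := ih (acc ++ PySem.Int.toChars (b : Int) ++ [c]) 0
        rw [Nat.cast_zero] at this
        rw [this, List.replicate_zero, List.nil_append,
          compress_replicate b hb (c :: t) (Or.inr ⟨c, t, rfl, hc⟩),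
          compress_cons_ne c t hc]
        simp
lemma compress_of_not_mem (s : List Char) (h : '_' ∉ s) : compress s = s := by
  induction s with
  | nil => exact compress_nil
  | cons c t ih =>
    have hc : c ≠ '_' := by rintro rfl; exact h (List.mem_cons_self ..)
    rw [compress_cons_ne c t hc, ih (fun hm => h (List.mem_cons_of_mem _ hm))]

lemma shrink_eq_compress (s : List Char) : shrink_blanks s = compress s := by
  by_cases h : '_' ∈ s
  · unfold shrink_blanks
    rw [if_neg (by simpa using h)]
    show sbFlush (s.foldl sbStep ([], (0 : Int))) = compress s
    have := shrink_fold_inv s [] 0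
    simpa using this
  · unfold shrink_blanks
    rw [if_pos h, compress_of_not_mem s h]

-- A's first loop builds exactly the map of squareChar
lemma fen_fold_eq_map (result : List String) :
    ∀ acc : List Char,
      result.foldl (fun fen sq =>
        if sq = "empty" then fen ++ ['_']
        else if (PySem.List.pyGet? sq.toList 0).getD ' ' = 'b' then
          fen ++ [(PySem.List.pyGet? sq.toList 1).getD ' ']
        else fen ++ [PySem.Chars.upperChar ((PySem.List.pyGet? sq.toList 1).getD ' ')]) acc
      = acc ++ result.map squareChar := by
  induction result with
  | nil => intro acc; simp
  | cons sq t ih =>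
    intro acc
    simp only [List.foldl_cons, List.map_cons, ih]
    unfold squareChar
    split_ifs <;> simp

-- slicing commutes with map (nonnegative bounds)
lemma slice_map {α β : Type} (f : α → β) (l : List α) (a b : Int) (ha : 0 ≤ a) (hb : 0 ≤ b) :
    PySem.List.slice (l.map f) (some a) (some b) =
      (PySem.List.slice l (some a) (some b)).map f := by
  rw [PySem.List.slice_toNat _ ha hb, PySem.List.slice_toNat _ ha hb]
  simp [List.map_take, List.map_drop]

-- ===== VERDICT (by name: the statement is the Claim_ definition above) =====
theorem get_fen_spec : Claim_equal_get_fen := by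
  intro result _ _
  unfold Spec_get_fen get_fen get_fen_alt
  simp only [fen_fold_eq_map result [], List.nil_append, List.map_map]
  have hr : PySem.List.pyRange 0 64 8 = [0, 8, 16, 24, 32, 40, 48, 56] := by decide
  rw [hr]
  refine congrArg _ (congrArg _ (List.map_congr_left ?_))
  intro i hi
  fin_cases hi <;>
    simp only [Function.comp_apply] <;>
    rw [slice_map squareChar result _ _ (by norm_num) (by norm_num), shrink_eq_compress]
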